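-- pv_equiv track=rewrite | github.com/aemilani/advent_of_code | solutions/2024/16.py | calc_score
-- ===== SOURCE A (Python) =====
-- from typing import Tuple, List
--
-- def calc_score(path: List[Tuple[int, int]]) -> int:
--     score = 0
--     dirs = [(0, 1)]
--     for i in range(1, len(path)):
--         diff = (path[i][0] - path[i - 1][0]), (path[i][1] - path[i - 1][1])
--         dirs.append(diff)
--     for i in range(1, len(dirs)):
--         if dirs[i] == dirs[i - 1]:
--             score += 1
--         else:
--             score += 1001
--     return score
-- ===== SOURCE B (Python) =====
-- from typing import Tuple, List
--
-- def calc_score(path: List[Tuple[int, int]]) -> int: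
--     if len(path) < 2:
--         return 0
--     turns = 1 if (path[1][0] - path[0][0], path[1][1] - path[0][1]) != (0, 1) else 0
--     for a, b, c in zip(path, path[1:], path[2:]):
--         if c[0] + a[0] != 2 * b[0] or c[1] + a[1] != 2 * b[1]:
--             turns += 1
--     return (len(path) - 1) + 1000 * turns
-- ===== Notes on version B (the rewrite author's own statement) =====
-- stated objective: simpler
-- what changed: B never builds the direction list: it counts turns directly by a collinearity test on consecutive point triples (plus the initial east-facing check) and returns steps + 1000*turns.
import Mathlib
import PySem

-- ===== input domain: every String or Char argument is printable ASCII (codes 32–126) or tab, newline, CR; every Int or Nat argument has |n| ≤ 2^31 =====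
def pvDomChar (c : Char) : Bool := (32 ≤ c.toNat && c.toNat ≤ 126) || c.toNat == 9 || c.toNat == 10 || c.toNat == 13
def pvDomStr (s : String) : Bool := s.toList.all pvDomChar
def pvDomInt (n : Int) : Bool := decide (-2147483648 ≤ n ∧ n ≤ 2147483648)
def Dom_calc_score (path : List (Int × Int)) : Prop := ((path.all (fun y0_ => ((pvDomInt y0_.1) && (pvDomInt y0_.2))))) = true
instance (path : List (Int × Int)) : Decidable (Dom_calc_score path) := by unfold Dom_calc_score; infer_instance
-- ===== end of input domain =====

-- B drops A's direction list: it counts turns by a collinearity test on consecutive point triples (simpler decomposition, same cost).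

-- ===== PORT A =====
-- first loop of A: append diff of consecutive points, previous point as state
def buildDirs : (Int × Int) → List (Int × Int) → List (Int × Int)
  | _, [] => []
  | prev, p :: rest => (p.1 - prev.1, p.2 - prev.2) :: buildDirs p rest

-- second loop of A: compare each dir with the previous one, accumulate 1 / 1001
def scoreDirs : (Int × Int) → List (Int × Int) → Int
  | _, [] => 0
  | prev, d :: rest => (if d = prev then 1 else 1001) + scoreDirs d rest

def calc_score (path : List (Int × Int)) : Int :=
  match path with
  | [] => scoreDirs (0, 1) (buildDirs (0, 0) [])   -- dirs = [(0,1)], inner loop runs 0 times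
  | p :: rest => scoreDirs (0, 1) (buildDirs p rest)

-- ===== PORT B =====
-- B's loop over zip(path, path[1:], path[2:]): count non-collinear triples
def countTurns : (Int × Int) → (Int × Int) → List (Int × Int) → Int
  | _, _, [] => 0
  | a, b, c :: rest =>
    (if c.1 + a.1 ≠ 2 * b.1 ∨ c.2 + a.2 ≠ 2 * b.2 then 1 else 0) + countTurns b c rest

def calc_score_alt (path : List (Int × Int)) : Int :=
  match path with
  | [] => 0
  | [_] => 0
  | p :: q :: rest =>
    let t0 : Int := if (q.1 - p.1, q.2 - p.2) ≠ ((0 : Int), (1 : Int)) then 1 else 0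
    ((p :: q :: rest).length : Int) - 1 + 1000 * (t0 + countTurns p q rest)

-- ===== PRECONDITION & SPEC =====
def Spec_calc_score (path : List (Int × Int)) (out : Int) : Prop := out = calc_score_alt path
instance (path : List (Int × Int)) (out : Int) : Decidable (Spec_calc_score path out) := by unfold Spec_calc_score; infer_instance

-- ===== CLAIM (what is proved, stated in full; the proofs are below) =====
def Claim_equal_calc_score : Prop := ∀ (path : List (Int × Int)), Dom_calc_score path → Spec_calc_score path (calc_score path)

-- ===== LEMMAS AND PROOFS =====

-- A's score from a diff-direction onward equals 1-per-step plus 1000-per-turn counted by triples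
theorem scoreDirs_eq_countTurns (rest : List (Int × Int)) :
    ∀ (a b : Int × Int),
      scoreDirs (b.1 - a.1, b.2 - a.2) (buildDirs b rest)
        = (rest.length : Int) + 1000 * countTurns a b rest := by
  induction rest with
  | nil => intro a b; simp [buildDirs, scoreDirs, countTurns]
  | cons c rest ih =>
    intro a b
    simp only [buildDirs, scoreDirs, countTurns, List.length_cons]
    rw [ih b c]
    by_cases h : c.1 + a.1 ≠ 2 * b.1 ∨ c.2 + a.2 ≠ 2 * b.2
    · rw [if_pos h, if_neg]
      · push_cast; ring
      · intro he
        have h1 : c.1 - b.1 = b.1 - a.1 := congrArg Prod.fst he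
        have h2 : c.2 - b.2 = b.2 - a.2 := congrArg Prod.snd he
        rcases h with h | h <;> omega
    · rw [if_neg h, if_pos]
      · push_cast; ring
      · push Not at h
        have : c.1 - b.1 = b.1 - a.1 ∧ c.2 - b.2 = b.2 - a.2 := ⟨by omega, by omega⟩
        exact Prod.ext this.1 this.2

-- ===== VERDICT (by name: the statement is the Claim_ definition above) =====
theorem calc_score_spec : Claim_equal_calc_score := by
  intro path _
  unfold Spec_calc_score
  match path with
  | [] => rfl
  | [p] => simp [calc_score, calc_score_alt, buildDirs, scoreDirs]
  | p :: q :: rest =>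
    simp only [calc_score, calc_score_alt, buildDirs, scoreDirs]
    rw [show (q.1 - p.1, q.2 - p.2) = ((q.1 - p.1, q.2 - p.2) : Int × Int) from rfl,
        scoreDirs_eq_countTurns rest p q]
    by_cases h : (q.1 - p.1, q.2 - p.2) = ((0 : Int), (1 : Int))
    · rw [if_pos h, if_neg (by simpa using h)]
      simp only [List.length_cons]; push_cast; ring
    · rw [if_neg h, if_pos (by simpa using h)]
      simp only [List.length_cons]; push_cast; ring
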